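-- pv_equiv track=rewrite | github.com/mr6infinityGem/rebirth | permutate.py | permutateFive
-- ===== SOURCE A (Python) =====
-- def rotate2(arr,b,e): #This is a helper function.  given an array and two indices rotates those indices(by 1)
-- 	if e<b:#make it right.  the beggining should be less than the end
-- 		x=e
-- 		e=b
-- 		b=x
-- 	holdMe=arr[b]
-- 	for i in range(b,e):
-- 		arr[i]=arr[i+1]
-- 	arr[e]=holdMe
-- 	return arr
--
-- def makeString(arr):#another helper.  takes an array of letters and makes it into a proper string
-- 	string=''
-- 	for i in range(len(arr)):
-- 		string+=arr[i]
-- 	return string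
--
-- def permutateFive(arr):#nonrecursive solution for an array of length 5...not sure how you would do it generally and not have it be recursive
-- 	solutions=[]
--
-- 	for i in range(5):
-- 		rotate2(arr,0,4)
-- 		for i in range(4):
-- 			rotate2(arr,1,4)
-- 			for i in range(3):
-- 				rotate2(arr,2,4)
-- 				for i in range(2):
-- 					rotate2(arr,3,4)
-- 					solutions.append(makeString(arr))
--
-- 	return solutions
-- ===== SOURCE B (Python) =====
-- def permutateFive(arr):  # recursive decomposition of the same rotation schedule
--     solutions = []
--
--     def rec(s):
--         for _ in range(5 - s):
--             arr[s:5] = arr[s + 1:5] + [arr[s]]  # rotate positions s..4 left by one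
--             if s == 3:
--                 solutions.append(''.join(arr))
--             else:
--                 rec(s + 1)
--
--     rec(0)
--     return solutions
-- ===== Notes on version B (the rewrite author's own statement) =====
-- stated objective: simpler
-- what changed: A's four manually-unrolled nested rotation loops are replaced by one recursive helper over the nesting level, with slice assignment and ''.join instead of the element-by-element rotate/concat helpers, producing the same 120 strings in the same order.
-- outside the precondition, e.g. on permutateFive(['a', 'b']): A raises IndexError, B raises IndexError
import Mathlib
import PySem

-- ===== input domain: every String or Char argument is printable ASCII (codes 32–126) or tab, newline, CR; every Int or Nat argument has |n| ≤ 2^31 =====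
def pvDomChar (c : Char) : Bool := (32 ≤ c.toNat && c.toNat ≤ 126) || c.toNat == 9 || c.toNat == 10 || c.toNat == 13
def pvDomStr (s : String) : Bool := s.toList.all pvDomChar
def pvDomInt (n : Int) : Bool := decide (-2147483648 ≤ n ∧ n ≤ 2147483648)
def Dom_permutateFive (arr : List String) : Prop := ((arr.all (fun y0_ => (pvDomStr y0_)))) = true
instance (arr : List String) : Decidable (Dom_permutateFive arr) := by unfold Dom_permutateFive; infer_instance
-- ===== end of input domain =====

-- B replaces A's four manually-unrolled nested rotation loops by one recursive helper over the
-- level s (simpler decomposition, same rotation schedule, same 120 strings in the same order).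
-- Python A and B both mutate the argument list in place (under Pre_ they leave it in the SAME
-- final state); the equivalence proved here is about the RETURN value only (the ports are pure).

-- ===== PORT A =====
-- rotate2(arr, b, e): the indices Python passes are always the in-range literals 0..4
-- (Pre_ gives len(arr) ≥ 5), so List.getD/List.set with default "" are exact there;
-- outside Pre_ Python raises IndexError.
def rotate2 (arr : List String) (b e : Nat) : List String :=
  let p := if e < b then (e, b) else (b, e)
  let holdMe := arr.getD p.1 ""
  let arr2 := (List.range' p.1 (p.2 - p.1)).foldl (fun a i => a.set i (a.getD (i + 1) "")) arr
  arr2.set p.2 holdMe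

-- makeString(arr): string = ''; for i in range(len(arr)): string += arr[i]
def makeString (arr : List String) : String :=
  (List.range arr.length).foldl (fun s i => s ++ arr.getD i "") ""

-- Python rebinds the single mutable `arr`; the pure port threads it as the first component of
-- the state (arr, solutions), re-reading the rotated list where Python re-reads `arr`.
def permutateFive (arr : List String) : List String :=
  ((List.range 5).foldl (fun (st : List String × List String) _ =>
    (List.range 4).foldl (fun st _ =>
      (List.range 3).foldl (fun st _ =>
        (List.range 2).foldl (fun st _ =>
          (rotate2 st.1 3 4, st.2 ++ [makeString (rotate2 st.1 3 4)]))
          (rotate2 st.1 2 4, st.2))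
        (rotate2 st.1 1 4, st.2))
      (rotate2 st.1 0 4, st.2)) (arr, [])).2

-- ===== PORT B =====
-- arr[s:5] = arr[s+1:5] + [arr[s]]  (slice assignment; arr[s] is in range under Pre_)
def rotateSlice (arr : List String) (s : Nat) : List String :=
  arr.take s ++ (PySem.List.slice arr (some ((s : Int) + 1)) (some 5) ++ [arr.getD s ""]) ++ arr.drop 5

-- rec(s) of Source B; the first argument is fuel (= 5 - s ≥ 1 on every reachable call, so the
-- fuel-out branch is never taken), used only to satisfy Lean's termination checker.
def permRec : Nat → Nat → List String × List String → List String × List String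
  | 0, _, st => st
  | d + 1, s, st =>
    (List.range (5 - s)).foldl (fun st _ =>
      if s == 3 then
        (rotateSlice st.1 s, st.2 ++ [PySem.Str.join "" (rotateSlice st.1 s)])
      else permRec d (s + 1) (rotateSlice st.1 s, st.2)) st

def permutateFive_alt (arr : List String) : List String :=
  (permRec 4 0 (arr, [])).2

-- ===== PRECONDITION & SPEC =====
-- Python A raises IndexError (rotate2 reads arr[4]) whenever len(arr) < 5; Pre_ excludes exactly those.
def Pre_permutateFive (arr : List String) : Prop := 5 ≤ arr.length
instance (arr : List String) : Decidable (Pre_permutateFive arr) := by unfold Pre_permutateFive; infer_instance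
def pvWitness_permutateFive : List String := ["a", "b", "c", "d", "e"]

def Spec_permutateFive (arr : List String) (out : List String) : Prop := out = permutateFive_alt arr
instance (arr : List String) (out : List String) : Decidable (Spec_permutateFive arr out) := by unfold Spec_permutateFive; infer_instance

-- ===== CLAIM (what is proved, stated in full; the proofs are below) =====
def Claim_equal_permutateFive : Prop := ∀ (arr : List String), Dom_permutateFive arr → Pre_permutateFive arr → Spec_permutateFive arr (permutateFive arr)

-- ===== LEMMAS AND PROOFS =====

-- The strings appended by one full run of the level-s loop started at x1…x5 (tail t):
-- each level cycles its suffix and recurses, returning the list to its starting order.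
def batch3 (x1 x2 x3 x4 x5 : String) (t : List String) : List String :=
  [PySem.Str.join "" (x1 :: x2 :: x3 :: x5 :: x4 :: t),
   PySem.Str.join "" (x1 :: x2 :: x3 :: x4 :: x5 :: t)]
def batch2 (x1 x2 x3 x4 x5 : String) (t : List String) : List String :=
  batch3 x1 x2 x4 x5 x3 t ++ batch3 x1 x2 x5 x3 x4 t ++ batch3 x1 x2 x3 x4 x5 t
def batch1 (x1 x2 x3 x4 x5 : String) (t : List String) : List String :=
  batch2 x1 x3 x4 x5 x2 t ++ batch2 x1 x4 x5 x2 x3 t ++ batch2 x1 x5 x2 x3 x4 t ++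
    batch2 x1 x2 x3 x4 x5 t
def batch0 (x1 x2 x3 x4 x5 : String) (t : List String) : List String :=
  batch1 x2 x3 x4 x5 x1 t ++ batch1 x3 x4 x5 x1 x2 t ++ batch1 x4 x5 x1 x2 x3 t ++
    batch1 x5 x1 x2 x3 x4 t ++ batch1 x1 x2 x3 x4 x5 t

theorem intercalate_nil_eq_flatten {α : Type} (xss : List (List α)) :
    ([] : List α).intercalate xss = xss.flatten := by
  induction xss with
  | nil => rfl
  | cons a t ih =>
    cases t with
    | nil => rfl
    | cons b u => simp_all [List.intercalate, List.intersperse]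

theorem append_ofList (a : String) (X : List Char) :
    a ++ String.ofList X = String.ofList (a.toList ++ X) := by
  apply String.toList_inj.mp
  simp

theorem foldl_append_eq_join (xs : List String) (s : String) :
    xs.foldl (· ++ ·) s = s ++ PySem.Str.join "" xs := by
  induction xs generalizing s with
  | nil =>
    apply String.toList_inj.mp
    simp [PySem.Str.join, PySem.Chars.join, intercalate_nil_eq_flatten]
  | cons a t ih =>
    simp only [List.foldl_cons, ih, PySem.Str.join, PySem.Chars.join, String.toList_empty,
      intercalate_nil_eq_flatten, List.map_cons, List.flatten_cons]
    rw [String.append_assoc, append_ofList]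

theorem makeString_fold (xs : List String) (s : String) :
    (List.range xs.length).foldl (fun s i => s ++ xs.getD i "") s = xs.foldl (· ++ ·) s := by
  induction xs generalizing s with
  | nil => simp
  | cons a t ih =>
    simp only [List.length_cons, List.range_succ_eq_map, List.foldl_cons, List.foldl_map,
      List.getD_cons_zero, List.getD_cons_succ]
    exact ih (s ++ a)

theorem makeString_eq_join (xs : List String) : makeString xs = PySem.Str.join "" xs := by
  have h := foldl_append_eq_join xs ""
  simp only [makeString, makeString_fold]
  simpa using h

theorem rotA0 (a b c d e : String) (t : List String) :
    rotate2 (a :: b :: c :: d :: e :: t) 0 4 = b :: c :: d :: e :: a :: t := rfl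
theorem rotA1 (a b c d e : String) (t : List String) :
    rotate2 (a :: b :: c :: d :: e :: t) 1 4 = a :: c :: d :: e :: b :: t := rfl
theorem rotA2 (a b c d e : String) (t : List String) :
    rotate2 (a :: b :: c :: d :: e :: t) 2 4 = a :: b :: d :: e :: c :: t := rfl
theorem rotA3 (a b c d e : String) (t : List String) :
    rotate2 (a :: b :: c :: d :: e :: t) 3 4 = a :: b :: c :: e :: d :: t := rfl

theorem rotB0 (a b c d e : String) (t : List String) :
    rotateSlice (a :: b :: c :: d :: e :: t) 0 = b :: c :: d :: e :: a :: t := by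
  unfold rotateSlice
  rw [show ((0:Nat):Int) + 1 = ((1:Nat) : Int) by norm_num, show (5 : Int) = ((5 : Nat) : Int) by norm_num,
      PySem.List.slice_natCast]
  rfl
theorem rotB1 (a b c d e : String) (t : List String) :
    rotateSlice (a :: b :: c :: d :: e :: t) 1 = a :: c :: d :: e :: b :: t := by
  unfold rotateSlice
  rw [show ((1:Nat):Int) + 1 = ((2:Nat) : Int) by norm_num, show (5 : Int) = ((5 : Nat) : Int) by norm_num,
      PySem.List.slice_natCast]
  rfl
theorem rotB2 (a b c d e : String) (t : List String) :
    rotateSlice (a :: b :: c :: d :: e :: t) 2 = a :: b :: d :: e :: c :: t := by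
  unfold rotateSlice
  rw [show ((2:Nat):Int) + 1 = ((3:Nat) : Int) by norm_num, show (5 : Int) = ((5 : Nat) : Int) by norm_num,
      PySem.List.slice_natCast]
  rfl
theorem rotB3 (a b c d e : String) (t : List String) :
    rotateSlice (a :: b :: c :: d :: e :: t) 3 = a :: b :: c :: e :: d :: t := by
  unfold rotateSlice
  rw [show ((3:Nat):Int) + 1 = ((4:Nat) : Int) by norm_num, show (5 : Int) = ((5 : Nat) : Int) by norm_num,
      PySem.List.slice_natCast]
  rfl

-- one-step unfoldings of permRec at each literal level (the if on s is decided definitionally)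
theorem permRecS3 (d : Nat) (st : List String × List String) :
    permRec (d + 1) 3 st = (List.range 2).foldl (fun st _ =>
      (rotateSlice st.1 3, st.2 ++ [PySem.Str.join "" (rotateSlice st.1 3)])) st := rfl
theorem permRecS2 (d : Nat) (st : List String × List String) :
    permRec (d + 1) 2 st = (List.range 3).foldl (fun st _ =>
      permRec d 3 (rotateSlice st.1 2, st.2)) st := rfl
theorem permRecS1 (d : Nat) (st : List String × List String) :
    permRec (d + 1) 1 st = (List.range 4).foldl (fun st _ =>
      permRec d 2 (rotateSlice st.1 1, st.2)) st := rfl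
theorem permRecS0 (d : Nat) (st : List String × List String) :
    permRec (d + 1) 0 st = (List.range 5).foldl (fun st _ =>
      permRec d 1 (rotateSlice st.1 0, st.2)) st := rfl

-- B side, level by level: each full loop restores the list and appends its batch
theorem LB3 (x1 x2 x3 x4 x5 : String) (t sols : List String) :
    permRec 1 3 (x1 :: x2 :: x3 :: x4 :: x5 :: t, sols)
      = (x1 :: x2 :: x3 :: x4 :: x5 :: t, sols ++ batch3 x1 x2 x3 x4 x5 t) := by
  rw [permRecS3]
  simp only [show List.range 2 = [0, 1] from rfl, List.foldl_cons, List.foldl_nil, List.append_assoc, List.cons_append, List.nil_append, rotB3, batch3]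

theorem LB2 (x1 x2 x3 x4 x5 : String) (t sols : List String) :
    permRec 2 2 (x1 :: x2 :: x3 :: x4 :: x5 :: t, sols)
      = (x1 :: x2 :: x3 :: x4 :: x5 :: t, sols ++ batch2 x1 x2 x3 x4 x5 t) := by
  rw [permRecS2]
  simp only [show List.range 3 = [0, 1, 2] from rfl, List.foldl_cons, List.foldl_nil, List.append_assoc, rotB2, LB3, batch2]

theorem LB1 (x1 x2 x3 x4 x5 : String) (t sols : List String) :
    permRec 3 1 (x1 :: x2 :: x3 :: x4 :: x5 :: t, sols)
      = (x1 :: x2 :: x3 :: x4 :: x5 :: t, sols ++ batch1 x1 x2 x3 x4 x5 t) := by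
  rw [permRecS1]
  simp only [show List.range 4 = [0, 1, 2, 3] from rfl, List.foldl_cons, List.foldl_nil, List.append_assoc, rotB1, LB2, batch1]

theorem LB0 (x1 x2 x3 x4 x5 : String) (t sols : List String) :
    permRec 4 0 (x1 :: x2 :: x3 :: x4 :: x5 :: t, sols)
      = (x1 :: x2 :: x3 :: x4 :: x5 :: t, sols ++ batch0 x1 x2 x3 x4 x5 t) := by
  rw [permRecS0]
  simp only [show List.range 5 = [0, 1, 2, 3, 4] from rfl, List.foldl_cons, List.foldl_nil, List.append_assoc, rotB0, LB1, batch0]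

-- A side, level by level
theorem LA3 (x1 x2 x3 x4 x5 : String) (t sols : List String) :
    (List.range 2).foldl (fun st _ =>
        (rotate2 st.1 3 4, st.2 ++ [makeString (rotate2 st.1 3 4)]))
      (x1 :: x2 :: x3 :: x4 :: x5 :: t, sols)
      = (x1 :: x2 :: x3 :: x4 :: x5 :: t, sols ++ batch3 x1 x2 x3 x4 x5 t) := by
  simp only [show List.range 2 = [0, 1] from rfl, List.foldl_cons, List.foldl_nil, List.append_assoc, List.cons_append, List.nil_append, rotA3, makeString_eq_join, batch3]

theorem LA2 (x1 x2 x3 x4 x5 : String) (t sols : List String) :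
    (List.range 3).foldl (fun st _ =>
        (List.range 2).foldl (fun st _ =>
          (rotate2 st.1 3 4, st.2 ++ [makeString (rotate2 st.1 3 4)]))
          (rotate2 st.1 2 4, st.2))
      (x1 :: x2 :: x3 :: x4 :: x5 :: t, sols)
      = (x1 :: x2 :: x3 :: x4 :: x5 :: t, sols ++ batch2 x1 x2 x3 x4 x5 t) := by
  simp only [show List.range 3 = [0, 1, 2] from rfl, List.foldl_cons, List.foldl_nil, List.append_assoc, rotA2, LA3, batch2]

theorem LA1 (x1 x2 x3 x4 x5 : String) (t sols : List String) :
    (List.range 4).foldl (fun st _ =>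
        (List.range 3).foldl (fun st _ =>
          (List.range 2).foldl (fun st _ =>
            (rotate2 st.1 3 4, st.2 ++ [makeString (rotate2 st.1 3 4)]))
            (rotate2 st.1 2 4, st.2))
          (rotate2 st.1 1 4, st.2))
      (x1 :: x2 :: x3 :: x4 :: x5 :: t, sols)
      = (x1 :: x2 :: x3 :: x4 :: x5 :: t, sols ++ batch1 x1 x2 x3 x4 x5 t) := by
  simp only [show List.range 4 = [0, 1, 2, 3] from rfl, List.foldl_cons, List.foldl_nil, List.append_assoc, rotA1, LA2, batch1]

theorem LA0 (x1 x2 x3 x4 x5 : String) (t sols : List String) :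
    (List.range 5).foldl (fun (st : List String × List String) _ =>
        (List.range 4).foldl (fun st _ =>
          (List.range 3).foldl (fun st _ =>
            (List.range 2).foldl (fun st _ =>
              (rotate2 st.1 3 4, st.2 ++ [makeString (rotate2 st.1 3 4)]))
              (rotate2 st.1 2 4, st.2))
            (rotate2 st.1 1 4, st.2))
          (rotate2 st.1 0 4, st.2))
      (x1 :: x2 :: x3 :: x4 :: x5 :: t, sols)
      = (x1 :: x2 :: x3 :: x4 :: x5 :: t, sols ++ batch0 x1 x2 x3 x4 x5 t) := by
  simp only [show List.range 5 = [0, 1, 2, 3, 4] from rfl, List.foldl_cons, List.foldl_nil, List.append_assoc, rotA0, LA1, batch0]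

-- ===== VERDICT (by name: the statement is the Claim_ definition above) =====
theorem permutateFive_spec : Claim_equal_permutateFive := by
  intro arr _ hpre
  unfold Spec_permutateFive
  rcases arr with _ | ⟨a, _ | ⟨b, _ | ⟨c, _ | ⟨d, _ | ⟨e, t⟩⟩⟩⟩⟩ <;>
    simp [Pre_permutateFive] at hpre
  unfold permutateFive permutateFive_alt
  rw [LA0, LB0]
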